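-- pv_equiv track=rewrite | github.com/jonaskrogell/adventofcode2017 | 3b.py | find
-- ===== SOURCE A (Python) =====
-- def getSum(matrix, x, y):
--     s = 0
--     cords = [(x + 1, y), (x + 1, y + 1), (x + 1, y - 1), (x - 1, y), (x - 1, y + 1), (x - 1, y - 1), (x, y + 1), (x, y - 1)]
--     for cord in cords:
--         if cord in matrix:
--             s += matrix[cord]
--     return s
--
-- def find(target):
--     matrix = {}
--     matrix[0, 0] = 1
--     if target == 1:
--         return 0, 0, 1
--     x = 0
--     y = 0
--     counter = 1
--     step_x = 1
--     dir_x = 1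
--     step_y = 1
--     dir_y = 1
--
--     while True:
--         for a in range(step_x):
--             x += dir_x
--             counter = getSum(matrix, x, y)
--             matrix[x, y] = counter
--             if counter > target:
--                 return x, y, counter
--         for a in range(step_y):
--             y += dir_y
--             counter = getSum(matrix, x, y)
--             matrix[x, y] = counter
--             if counter > target:
--                 return x, y, counter
--         step_x += 1
--         step_y += 1
--         dir_x = dir_x * -1
--         dir_y = dir_y * -1
-- ===== SOURCE B (Python) =====
-- def cell_coord(n, r):
--     # coordinates of spiral index n (n >= 1), which lies on ring r = max(|x|,|y|)
--     k = n - (2 * r - 1) ** 2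
--     side, t = divmod(k, 2 * r)
--     if side == 0:
--         return r, t - (r - 1)
--     if side == 1:
--         return r - 1 - t, r
--     if side == 2:
--         return -r, r - 1 - t
--     return t - (r - 1), -r
--
-- def coord_index(x, y):
--     # spiral index of coordinate (x, y): inverse of cell_coord
--     if x == 0 and y == 0:
--         return 0
--     r = max(abs(x), abs(y))
--     s = (2 * r - 1) ** 2
--     if x == r and y != -r:
--         return s + y + r - 1
--     if y == r:
--         return s + 2 * r + (r - 1 - x)
--     if x == -r:
--         return s + 4 * r + (r - 1 - y)
--     return s + 6 * r + (x + r - 1)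
--
-- def find(target):
--     vals = [1]
--     if target == 1:
--         return 0, 0, 1
--     r = 1
--     n = 1
--     while True:
--         if (2 * r + 1) ** 2 <= n:
--             r += 1
--         x, y = cell_coord(n, r)
--         v = 0
--         for dx in (-1, 0, 1):
--             for dy in (-1, 0, 1):
--                 if dx == 0 and dy == 0:
--                     continue
--                 j = coord_index(x + dx, y + dy)
--                 if j < n:
--                     v += vals[j]
--         vals.append(v)
--         if v > target:
--             return x, y, v
--         n += 1
-- ===== Notes on version B (the rewrite author's own statement) =====
-- stated objective: alternative
-- what changed: Replaces A's 2D dict-of-coordinates spiral walk (mirrored per-axis loops with step/dir counters, 8 hard-coded membership-guarded lookups) by a flat 1D list indexed by spiral position: closed-form ring arithmetic maps spiral index to coordinates and each neighbor coordinate back to its spiral index, so neighbor values are read by integer index (j < n means already computed) with no dictionary and no walking cursor.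
import Mathlib
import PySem

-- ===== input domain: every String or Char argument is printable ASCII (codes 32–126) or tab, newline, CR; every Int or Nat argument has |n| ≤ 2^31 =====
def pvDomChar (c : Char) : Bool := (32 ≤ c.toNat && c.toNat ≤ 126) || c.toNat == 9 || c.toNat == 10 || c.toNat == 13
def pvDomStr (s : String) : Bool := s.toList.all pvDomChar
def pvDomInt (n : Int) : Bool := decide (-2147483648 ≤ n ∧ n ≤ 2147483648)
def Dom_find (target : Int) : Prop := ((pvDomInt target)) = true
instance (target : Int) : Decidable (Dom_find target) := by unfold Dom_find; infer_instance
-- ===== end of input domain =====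

-- B replaces A's 2D coordinate dict and mirrored per-axis walking loops by a flat 1D list of
-- values indexed by spiral position, using closed-form ring arithmetic both ways (index →
-- coordinate for the current cell, coordinate → index for its 8 neighbors); a neighbor is
-- "already filled" iff its spiral index is < n (objective: alternative; same asymptotic cost).
-- The 'while True' loops are ported with fuel (A: 12 rounds, B: 156 cells = the same cell
-- stream); the first value exceeding 2^31 appears at spiral index 145 (round 12), so the
-- loops return within the fuel for every target in Dom, and the equivalence theorem holds
-- for every target regardless (both sides default to (0, 0, 0) past the fuel).

-- ===== PORT A =====
-- 'if cord in matrix: s += matrix[cord]' — membership test + lookup ported as one get?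
-- match (exact: contains ↔ get?.isSome, and matrix[cord] = the some-value).
def getSum (matrix : PySem.Dict (Int × Int) Int) (x y : Int) : Int :=
  let cords : List (Int × Int) :=
    [(x + 1, y), (x + 1, y + 1), (x + 1, y - 1), (x - 1, y), (x - 1, y + 1), (x - 1, y - 1),
     (x, y + 1), (x, y - 1)]
  cords.foldl (fun s cord =>
    match matrix.get? cord with
    | some v => s + v
    | none => s) 0

-- 'for a in range(step_x)' of A's first inner loop: either early-returns (.inl) or yields
-- the updated (matrix, x) (.inr).
def findX (target : Int) : Nat → PySem.Dict (Int × Int) Int → Int → Int → Int →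
    (Int × Int × Int) ⊕ (PySem.Dict (Int × Int) Int × Int)
  | 0, matrix, x, _, _ => .inr (matrix, x)
  | n + 1, matrix, x, y, dirx =>
    let x := x + dirx
    let counter := getSum matrix x y
    let matrix := matrix.insert (x, y) counter
    if counter > target then .inl (x, y, counter)
    else findX target n matrix x y dirx

-- A's second inner loop (moves y).
def findY (target : Int) : Nat → PySem.Dict (Int × Int) Int → Int → Int → Int →
    (Int × Int × Int) ⊕ (PySem.Dict (Int × Int) Int × Int)
  | 0, matrix, _, y, _ => .inr (matrix, y)
  | n + 1, matrix, x, y, diry =>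
    let y := y + diry
    let counter := getSum matrix x y
    let matrix := matrix.insert (x, y) counter
    if counter > target then .inl (x, y, counter)
    else findY target n matrix x y diry

-- A's 'while True' with fuel; step_x/step_y are Python ints (Int), range(step) has
-- step.toNat iterations (exact: range of a nonpositive bound is empty).
def findMain (target : Int) : Nat → PySem.Dict (Int × Int) Int → Int → Int →
    Int → Int → Int → Int → Int × Int × Int
  | 0, _, _, _, _, _, _, _ => (0, 0, 0)
  | fuel + 1, matrix, x, y, stepx, dirx, stepy, diry =>
    match findX target stepx.toNat matrix x y dirx with
    | .inl r => r
    | .inr (matrix, x) =>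
      match findY target stepy.toNat matrix x y diry with
      | .inl r => r
      | .inr (matrix, y) =>
        findMain target fuel matrix x y (stepx + 1) (dirx * (-1)) (stepy + 1) (diry * (-1))

def find (target : Int) : Int × Int × Int :=
  let matrix : PySem.Dict (Int × Int) Int := PySem.Dict.empty.insert (0, 0) 1
  if target = 1 then (0, 0, 1)
  else findMain target 12 matrix 0 0 1 1 1 1

-- ===== PORT B =====
-- divmod(k, 2*r) → PySem.Int.floordiv / mod (exact Python semantics).
def cellCoord (n r : Int) : Int × Int :=
  let k := n - (2 * r - 1) ^ 2
  let side := PySem.Int.floordiv k (2 * r)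
  let t := PySem.Int.mod k (2 * r)
  if side = 0 then (r, t - (r - 1))
  else if side = 1 then (r - 1 - t, r)
  else if side = 2 then (-r, r - 1 - t)
  else (t - (r - 1), -r)

def coordIndex (x y : Int) : Int :=
  if x = 0 ∧ y = 0 then 0
  else
    let r := max |x| |y|
    let s := (2 * r - 1) ^ 2
    if x = r ∧ y ≠ -r then s + y + r - 1
    else if y = r then s + 2 * r + (r - 1 - x)
    else if x = -r then s + 4 * r + (r - 1 - y)
    else s + 6 * r + (x + r - 1)

-- B's dx,dy scan; 'vals[j]' ported as pyGet? with getD 0 (exact: the guard j < n = len(vals)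
-- and coordIndex ≥ 0 keep the index in range, so the default is never used).
def altNeighborSum (vals : List Int) (n x y : Int) : Int :=
  ([-1, 0, 1] : List Int).foldl (fun v dx =>
    ([-1, 0, 1] : List Int).foldl (fun v dy =>
      if dx = 0 ∧ dy = 0 then v
      else
        let j := coordIndex (x + dx) (y + dy)
        if j < n then v + (PySem.List.pyGet? vals j).getD 0 else v) v) 0

-- B's 'while True' with fuel over the cell stream (state: vals, ring r, spiral index n).
def findAltLoop (target : Int) : Nat → List Int → Int → Int → Int × Int × Int
  | 0, _, _, _ => (0, 0, 0)
  | fuel + 1, vals, r, n =>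
    let r := if (2 * r + 1) ^ 2 ≤ n then r + 1 else r
    let xy := cellCoord n r
    let v := altNeighborSum vals n xy.1 xy.2
    let vals := vals ++ [v]
    if v > target then (xy.1, xy.2, v)
    else findAltLoop target fuel vals r (n + 1)

def find_alt (target : Int) : Int × Int × Int :=
  if target = 1 then (0, 0, 1) else findAltLoop target 156 [1] 1 1

-- ===== PRECONDITION & SPEC =====
def Spec_find (target : Int) (out : Int × Int × Int) : Prop := out = find_alt target
instance (target : Int) (out : Int × Int × Int) : Decidable (Spec_find target out) := by unfold Spec_find; infer_instance

-- ===== CLAIM (what is proved, stated in full; the proofs are below) =====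
def Claim_equal_find : Prop := ∀ (target : Int), Dom_find target → Spec_find target (find target)

-- ===== LEMMAS AND PROOFS =====

-- Both loops are "return the first emitted cell whose value exceeds target, else (0,0,0)";
-- the emitted cell streams are target-independent closed terms, equal by computation.

def pvHit (target : Int) (c : Int × Int × Int) : Bool := decide (c.2.2 > target)

-- A's x-loop without the early exit: the emitted cells plus the final (matrix, x).
def traceX : Nat → PySem.Dict (Int × Int) Int → Int → Int → Int →
    List (Int × Int × Int) × PySem.Dict (Int × Int) Int × Int
  | 0, matrix, x, _, _ => ([], matrix, x)
  | n + 1, matrix, x, y, dirx =>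
    let x := x + dirx
    let counter := getSum matrix x y
    let matrix := matrix.insert (x, y) counter
    match traceX n matrix x y dirx with
    | (l, m2, x2) => ((x, y, counter) :: l, m2, x2)

def traceY : Nat → PySem.Dict (Int × Int) Int → Int → Int → Int →
    List (Int × Int × Int) × PySem.Dict (Int × Int) Int × Int
  | 0, matrix, _, y, _ => ([], matrix, y)
  | n + 1, matrix, x, y, diry =>
    let y := y + diry
    let counter := getSum matrix x y
    let matrix := matrix.insert (x, y) counter
    match traceY n matrix x y diry with
    | (l, m2, y2) => ((x, y, counter) :: l, m2, y2)

def traceMain : Nat → PySem.Dict (Int × Int) Int → Int → Int → Int → Int → Int → Int →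
    List (Int × Int × Int)
  | 0, _, _, _, _, _, _, _ => []
  | fuel + 1, matrix, x, y, stepx, dirx, stepy, diry =>
    match traceX stepx.toNat matrix x y dirx with
    | (lx, m2, x2) =>
      match traceY stepy.toNat m2 x2 y diry with
      | (ly, m3, y3) =>
        lx ++ ly ++ traceMain fuel m3 x2 y3 (stepx + 1) (dirx * (-1)) (stepy + 1) (diry * (-1))

-- B's emitted cell stream.
def traceAlt : Nat → List Int → Int → Int → List (Int × Int × Int)
  | 0, _, _, _ => []
  | fuel + 1, vals, r, n =>
    let r := if (2 * r + 1) ^ 2 ≤ n then r + 1 else r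
    let xy := cellCoord n r
    let v := altNeighborSum vals n xy.1 xy.2
    (xy.1, xy.2, v) :: traceAlt fuel (vals ++ [v]) r (n + 1)

theorem findX_eq_trace (target : Int) (n : Nat) (m : PySem.Dict (Int × Int) Int) (x y d : Int) :
    findX target n m x y d =
      match (traceX n m x y d).1.find? (pvHit target) with
      | some c => .inl c
      | none => .inr (traceX n m x y d).2 := by
  induction n generalizing m x with
  | zero => simp [findX, traceX]
  | succ n ih =>
    simp only [findX, traceX, List.find?]
    by_cases h : getSum m (x + d) y > target
    · simp [pvHit, h]
    · simp [pvHit, h, ih]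

theorem findY_eq_trace (target : Int) (n : Nat) (m : PySem.Dict (Int × Int) Int) (x y d : Int) :
    findY target n m x y d =
      match (traceY n m x y d).1.find? (pvHit target) with
      | some c => .inl c
      | none => .inr (traceY n m x y d).2 := by
  induction n generalizing m y with
  | zero => simp [findY, traceY]
  | succ n ih =>
    simp only [findY, traceY, List.find?]
    by_cases h : getSum m x (y + d) > target
    · simp [pvHit, h]
    · simp [pvHit, h, ih]

theorem findMain_eq_trace (target : Int) (fuel : Nat) :
    ∀ (m : PySem.Dict (Int × Int) Int) (x y sx dx sy dy : Int),
      findMain target fuel m x y sx dx sy dy =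
        ((traceMain fuel m x y sx dx sy dy).find? (pvHit target)).getD (0, 0, 0) := by
  induction fuel with
  | zero => intro m x y sx dx sy dy; simp [findMain, traceMain]
  | succ fuel ih =>
    intro m x y sx dx sy dy
    simp only [findMain, traceMain, findX_eq_trace, findY_eq_trace]
    rcases htx : traceX sx.toNat m x y dx with ⟨lx, m2, x2⟩
    cases hx : lx.find? (pvHit target) with
    | some c => simp [List.find?_append, hx]
    | none =>
      simp only [hx]
      rcases hty : traceY sy.toNat m2 x2 y dy with ⟨ly, m3, y3⟩
      cases hy : ly.find? (pvHit target) with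
      | some c => simp [List.find?_append, hx, hy]
      | none => simp [List.find?_append, hx, hy, ih]

theorem findAltLoop_eq_trace (target : Int) (fuel : Nat) :
    ∀ (vals : List Int) (r n : Int),
      findAltLoop target fuel vals r n =
        ((traceAlt fuel vals r n).find? (pvHit target)).getD (0, 0, 0) := by
  induction fuel with
  | zero => intro vals r n; simp [findAltLoop, traceAlt]
  | succ fuel ih =>
    intro vals r n
    simp only [findAltLoop, traceAlt, List.find?]
    by_cases h : altNeighborSum vals n (cellCoord n (if (2 * r + 1) ^ 2 ≤ n then r + 1 else r)).1
        (cellCoord n (if (2 * r + 1) ^ 2 ≤ n then r + 1 else r)).2 > target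
    · simp [pvHit, h]
    · simp [pvHit, h, ih]

-- The two closed cell streams coincide.
set_option maxRecDepth 100000 in
set_option maxHeartbeats 4000000 in
theorem trace_eq :
    traceMain 12 (PySem.Dict.empty.insert (0, 0) 1) 0 0 1 1 1 1 = traceAlt 156 [1] 1 1 := by
  decide

-- ===== VERDICT (by name: the statement is the Claim_ definition above) =====
theorem find_spec : Claim_equal_find := by
  intro target _
  unfold Spec_find find find_alt
  by_cases h : target = 1
  · simp [h]
  · simp only [h, if_false]
    rw [findMain_eq_trace, findAltLoop_eq_trace, trace_eq]
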